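-- pv_equiv track=rewrite | github.com/mmh132/ProjectEuler | work/P171rewrite.py | sumperms
-- ===== SOURCE A (Python) =====
-- def sumperms(thing):
--     if len(thing) == 0: return 0
--     if len(thing) == 1: return thing[0]
--     thing = sorted(thing)
--     absnum = [1]
--     numref = [thing[0]]
--     uniquenums = 1
--     for i in range(len(thing)-1):
--         if thing[i] == thing[i+1]: absnum[-1]+=1
--         else: absnum.append(1); uniquenums+=1; numref.append(thing[i+1])
--     rv = 0
--     onedigit = 0
--     for i in range(len(numref)):
--         onedigit += numref[i]*(len(thing)-1)
--     for i in range(len(thing)):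
--         rv+=onedigit*(10**i)
--     return rv
-- ===== SOURCE B (Python) =====
-- def sumperms(thing):
--     if not thing:
--         return 0
--     if len(thing) == 1:
--         return thing[0]
--     n = len(thing)
--     return sum(set(thing)) * (n - 1) * ((10 ** n - 1) // 9)
-- ===== Notes on version B (the rewrite author's own statement) =====
-- stated objective: faster
-- what changed: Replaces A's sort plus three accumulation loops (adjacent-duplicate counting, per-unique-value weighting, digit-place summation) with a single closed-form expression sum(set(thing)) * (n-1) * ((10**n - 1)//9).
import Mathlib
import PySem

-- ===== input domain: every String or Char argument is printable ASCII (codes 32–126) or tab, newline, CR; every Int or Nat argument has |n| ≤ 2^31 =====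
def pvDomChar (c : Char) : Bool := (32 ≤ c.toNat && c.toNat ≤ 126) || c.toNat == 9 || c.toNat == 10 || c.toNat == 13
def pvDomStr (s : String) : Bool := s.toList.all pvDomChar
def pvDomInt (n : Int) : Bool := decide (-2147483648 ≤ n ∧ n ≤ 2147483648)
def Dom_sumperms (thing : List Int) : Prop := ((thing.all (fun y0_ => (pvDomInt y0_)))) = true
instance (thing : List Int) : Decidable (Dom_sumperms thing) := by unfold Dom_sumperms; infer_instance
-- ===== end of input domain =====

-- B replaces A's sort + three accumulation loops by the closed form sum(set) * (n-1) * repunit(n); measurably faster on large inputs.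


-- ===== PORT A =====
def sumperms (thing : List Int) : Int :=
  if thing.length = 0 then 0
  else if thing.length = 1 then PySem.List.pyGetD thing 0 0
  else
    let t := PySem.List.sorted thing (fun x => x) false
    let st := (PySem.List.pyRange 0 ((t.length : Int) - 1) 1).foldl
      (fun (s : List Int × List Int × Int) i =>
        if PySem.List.pyGetD t i 0 = PySem.List.pyGetD t (i + 1) 0 then
          (PySem.List.pySetD s.1 (-1) (PySem.List.pyGetD s.1 (-1) 0 + 1), s.2.1, s.2.2)
        else
          (s.1 ++ [1], s.2.1 ++ [PySem.List.pyGetD t (i + 1) 0], s.2.2 + 1))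
      ([1], [PySem.List.pyGetD t 0 0], 1)
    let numref := st.2.1
    let onedigit := (PySem.List.pyRange 0 ((numref.length : Int)) 1).foldl
      (fun acc i => acc + PySem.List.pyGetD numref i 0 * ((t.length : Int) - 1)) 0
    let rv := (PySem.List.pyRange 0 ((t.length : Int)) 1).foldl
      (fun acc i => acc + onedigit * 10 ^ i.toNat) 0
    rv

-- ===== PORT B =====
def sumperms_alt (thing : List Int) : Int :=
  if thing.length = 0 then 0
  else if thing.length = 1 then PySem.List.pyGetD thing 0 0
  else
    let n : Int := thing.length
    (PySem.Set.ofList thing).sum * (n - 1) * PySem.Int.floordiv (10 ^ n.toNat - 1) 9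

-- ===== PRECONDITION & SPEC =====
def Spec_sumperms (thing : List Int) (out : Int) : Prop := out = sumperms_alt thing
instance (thing : List Int) (out : Int) : Decidable (Spec_sumperms thing out) := by unfold Spec_sumperms; infer_instance

-- ===== CLAIM (what is proved, stated in full; the proofs are below) =====
def Claim_equal_sumperms : Prop := ∀ (thing : List Int), Dom_sumperms thing → Spec_sumperms thing (sumperms thing)

-- ===== LEMMAS AND PROOFS =====

-- adjacent-duplicate collapse of a list, skipping the head (what A's first loop appends to numref)
def adj : List Int → List Int
  | [] => []
  | [_] => []
  | x :: y :: r => (if x = y then [] else [y]) ++ adj (y :: r)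

-- A's first loop only reads t[i], t[i+1]: an index fold over range(len(t)-1) is a fold over adjacent pairs
theorem foldl_range_pairs {σ : Type} (g : σ → Int → Int → σ) (t : List Int) (d : Int) :
    ∀ (k j : Nat) (s : σ), t.length - 1 - j = k →
      (PySem.List.pyRange (j : Int) ((t.length : Int) - 1) 1).foldl
        (fun s i => g s (PySem.List.pyGetD t i d) (PySem.List.pyGetD t (i + 1) d)) s
      = ((t.drop j).zip (t.drop (j + 1))).foldl (fun s p => g s p.1 p.2) s := by
  intro k
  induction k with
  | zero =>
    intro j s hk
    rw [PySem.List.pyRange_one_eq_nil (by omega)]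
    rw [List.drop_eq_nil_of_le (by omega : t.length ≤ j + 1)]
    simp
  | succ k ih =>
    intro j s hk
    have hj1 : j + 1 < t.length := by omega
    have hj : j < t.length := by omega
    rw [PySem.List.pyRange_one_cons (by omega), List.foldl_cons]
    have e1 : PySem.List.pyGetD t (j : Int) d = t[j] := by
      rw [PySem.List.pyGetD_natCast, List.getD_eq_getElem _ _ hj]
    have e2 : PySem.List.pyGetD t ((j : Int) + 1) d = t[j + 1] := by
      have hc : ((j : Int) + 1) = ((j + 1 : Nat) : Int) := by push_cast; ring
      rw [hc, PySem.List.pyGetD_natCast, List.getD_eq_getElem _ _ hj1]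
    rw [e1, e2]
    have hc : ((j : Int) + 1) = ((j + 1 : Nat) : Int) := by push_cast; ring
    rw [hc, ih (j + 1) _ (by omega)]
    rw [List.drop_eq_getElem_cons hj, List.drop_eq_getElem_cons hj1, List.zip_cons_cons,
      List.foldl_cons]

-- the numref component of A's first loop is the seed followed by adj of the sorted list
theorem fold_pairs_numref :
    ∀ (t a nr : List Int) (u : Int),
      ((t.zip t.tail).foldl
        (fun (s : List Int × List Int × Int) (p : Int × Int) =>
          if p.1 = p.2 then
            (PySem.List.pySetD s.1 (-1) (PySem.List.pyGetD s.1 (-1) 0 + 1), s.2.1, s.2.2)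
          else
            (s.1 ++ [1], s.2.1 ++ [p.2], s.2.2 + 1)) (a, nr, u)).2.1
      = nr ++ adj t
  | [], _, nr, _ => by simp [adj]
  | [_], _, nr, _ => by simp [adj]
  | x :: y :: r, a, nr, u => by
    rw [List.tail_cons, List.zip_cons_cons, List.foldl_cons]
    by_cases h : x = y
    · simp only [adj, if_pos h, List.nil_append]
      exact fold_pairs_numref (y :: r) _ nr u
    · simp only [adj, if_neg h]
      have hrec := fold_pairs_numref (y :: r) (a ++ [1]) (nr ++ [y]) (u + 1)
      rw [List.tail_cons] at hrec
      rw [hrec, List.append_assoc]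

-- on a sorted list, head :: adj is duplicate-free and has exactly the list's members
theorem adj_spec : ∀ (xs : List Int) (x : Int), (x :: xs).Pairwise (· ≤ ·) →
    (x :: adj (x :: xs)).Nodup ∧ ∀ a, a ∈ x :: adj (x :: xs) ↔ a ∈ x :: xs
  | [], x, _ => by simp [adj]
  | y :: r, x, hp => by
    obtain ⟨h1, hp'⟩ := List.pairwise_cons.mp hp
    obtain ⟨ihnd, ihmem⟩ := adj_spec r y hp'
    by_cases h : x = y
    · subst h
      refine ⟨by simpa [adj] using ihnd, fun a => ?_⟩
      have hm := ihmem a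
      simp only [adj, List.mem_cons] at hm ⊢
      simp only [if_pos trivial, List.nil_append, List.mem_cons] at *
      tauto
    · have hxy : x < y := lt_of_le_of_ne (h1 y (by simp)) h
      have hylo : ∀ z ∈ y :: r, y ≤ z := by
        intro z hz
        rcases List.mem_cons.mp hz with rfl | hz
        · exact le_refl z
        · exact (List.pairwise_cons.mp hp').1 z hz
      refine ⟨?_, fun a => ?_⟩
      · simp only [adj, if_neg h, List.singleton_append]
        refine List.nodup_cons.mpr ⟨?_, ihnd⟩
        intro hx
        have hxmem : x ∈ y :: r := (ihmem x).mp hx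
        exact absurd (hylo x hxmem) (not_le.mpr hxy)
      · simp only [adj, if_neg h, List.singleton_append, List.mem_cons]
        have := ihmem a
        simp only [List.mem_cons] at this ⊢
        tauto

theorem foldl_mul_add (c : Int) : ∀ (xs : List Int) (init : Int),
    xs.foldl (fun a x => a + x * c) init = init + xs.sum * c
  | [], init => by simp
  | x :: xs, init => by
    rw [List.foldl_cons, foldl_mul_add c xs (init + x * c), List.sum_cons]
    ring

theorem foldl_pow_add (c : Int) : ∀ (n : Nat),
    (List.range n).foldl (fun acc k => acc + c * 10 ^ k) 0
      = c * ((List.range n).map (fun k => (10 : Int) ^ k)).sum := by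
  intro n
  induction n with
  | zero => simp
  | succ m ih =>
    rw [List.range_succ, List.foldl_append, List.map_append, List.sum_append, ih]
    simp
    ring

theorem rv_closed (c : Int) (n : Nat) :
    (PySem.List.pyRange 0 (n : Int) 1).foldl (fun acc i => acc + c * 10 ^ i.toNat) 0
      = c * ((List.range n).map (fun k => (10 : Int) ^ k)).sum := by
  rw [PySem.List.pyRange_zero_nat, List.foldl_map]
  rw [← foldl_pow_add c n]
  simp

theorem repunit_closed (n : Nat) :
    PySem.Int.floordiv (10 ^ n - 1) 9 = ((List.range n).map (fun k => (10 : Int) ^ k)).sum := by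
  have h9 : (9 : Int) * ((List.range n).map (fun k => (10 : Int) ^ k)).sum = 10 ^ n - 1 := by
    induction n with
    | zero => simp
    | succ m ih =>
      rw [List.range_succ, List.map_append, List.sum_append, pow_succ]
      simp
      linarith [ih]
  rw [← h9, PySem.Int.floordiv_eq_ediv_of_pos (by norm_num), Int.mul_ediv_cancel_left _ (by norm_num)]

-- ===== VERDICT (by name: the statement is the Claim_ definition above) =====
theorem sumperms_spec : Claim_equal_sumperms := by
  unfold Claim_equal_sumperms
  intro thing _
  unfold Spec_sumperms sumperms sumperms_alt
  by_cases h0 : thing.length = 0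
  · simp [h0]
  by_cases h1 : thing.length = 1
  · simp [h1]
  simp only [if_neg h0, if_neg h1]
  have hlen : (PySem.List.sorted thing (fun x => x) false).length = thing.length :=
    PySem.List.length_sorted thing (fun x => x) false
  set t := PySem.List.sorted thing (fun x => x) false with ht
  -- step 1: the first loop's numref component
  have h2 := foldl_range_pairs
    (fun (s : List Int × List Int × Int) (a b : Int) =>
      if a = b then
        (PySem.List.pySetD s.1 (-1) (PySem.List.pyGetD s.1 (-1) 0 + 1), s.2.1, s.2.2)
      else
        (s.1 ++ [1], s.2.1 ++ [b], s.2.2 + 1)) t 0 (t.length - 1) 0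
    ([1], [PySem.List.pyGetD t 0 0], 1) rfl
  rw [Nat.cast_zero] at h2
  beta_reduce at h2
  simp only [List.drop_zero, Nat.zero_add, List.drop_one] at h2
  have h3 := fold_pairs_numref t [1] [PySem.List.pyGetD t 0 0] 1
  simp only [h2, h3, List.singleton_append]
  -- step 2: the onedigit loop is a fold over numref, i.e. sum * (len-1)
  have h4 := PySem.List.foldl_pyRange_zero_pyGetD' (PySem.List.pyGetD t 0 0 :: adj t) 0
      (fun a x => a + x * ((t.length : Int) - 1)) 0
  beta_reduce at h4
  simp only [h4, foldl_mul_add, zero_add]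
  -- step 3: the rv loop is onedigit * repunit
  simp only [rv_closed]
  -- step 4: B's floordiv is the same repunit
  simp only [Int.toNat_natCast]
  rw [repunit_closed thing.length]
  -- step 5: the deduplicated sum equals the sum over set(thing)
  obtain ⟨x, xs, heq⟩ : ∃ x xs, t = x :: xs := by
    cases ht2 : t with
    | nil => rw [ht2] at hlen; simp at hlen; omega
    | cons x xs => exact ⟨x, xs, rfl⟩
  have hp : (x :: xs).Pairwise (· ≤ ·) := by
    have := PySem.List.sorted_pairwise thing (fun x => x)
    rw [← ht, heq] at this
    simpa using this
  obtain ⟨hnd, hmem⟩ := adj_spec xs x hp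
  have hperm : (x :: adj (x :: xs)).Perm (PySem.Set.ofList thing) := by
    refine (List.perm_ext_iff_of_nodup hnd (PySem.Set.nodup_ofList thing)).mpr fun a => ?_
    rw [hmem a, PySem.Set.mem_ofList]
    rw [← heq, ht]
    exact PySem.List.mem_sorted thing (fun x => x) false a
  have hsum : (x :: adj (x :: xs)).sum = (PySem.Set.ofList thing).sum := hperm.sum_eq
  have hl2 : (x :: xs).length = thing.length := by rw [← heq]; exact hlen
  rw [heq, PySem.List.pyGetD_zero_cons, hl2, hsum]
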